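-- pv_equiv track=rewrite | github.com/MultiAgentSystemsComputerGraphics/TidyMesh_Sim | TidyMesh_Sim_v3.py | bfs_first_step
-- ===== SOURCE A (Python) =====
-- from collections import defaultdict, deque
--
-- def bfs_first_step(src, dst, nbrs):
--     if src == dst: return src
--     q, seen = deque([src]), {src: None}
--     while q:
--         u = q.popleft()
--         for v in nbrs.get(u, ()):
--             if v not in seen:
--                 seen[v] = u
--                 if v == dst:
--                     cur, prev = v, u
--                     while seen[prev] is not None:
--                         cur, prev = prev, seen[prev]
--                     return cur
--                 q.append(v)
--     return src
-- ===== SOURCE B (Python) =====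
-- def bfs_first_step(src, dst, nbrs):
--     # Level-synchronous BFS: the frontier carries (node, first_step) pairs and
--     # 'seen' is a plain set, so there is no parent map and no backtracking pass.
--     if src == dst:
--         return src
--     seen = {src}
--     frontier = []
--     for v in nbrs.get(src, ()):
--         if v not in seen:
--             seen.add(v)
--             if v == dst:
--                 return v
--             frontier.append((v, v))
--     while frontier:
--         nxt = []
--         for u, step in frontier:
--             for v in nbrs.get(u, ()):
--                 if v not in seen:
--                     seen.add(v)
--                     if v == dst:
--                         return step
--                     nxt.append((v, step))
--         frontier = nxt
--     return src
-- ===== Notes on version B (the rewrite author's own statement) =====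
-- stated objective: alternative
-- what changed: B is a level-synchronous BFS: the frontier is a list of (node, first-step) pairs and 'seen' is a plain set, so A's parent dictionary and its whole backtracking while-loop disappear; the answer is the step label carried by the expanding frontier entry when dst is discovered.
import Mathlib
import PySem

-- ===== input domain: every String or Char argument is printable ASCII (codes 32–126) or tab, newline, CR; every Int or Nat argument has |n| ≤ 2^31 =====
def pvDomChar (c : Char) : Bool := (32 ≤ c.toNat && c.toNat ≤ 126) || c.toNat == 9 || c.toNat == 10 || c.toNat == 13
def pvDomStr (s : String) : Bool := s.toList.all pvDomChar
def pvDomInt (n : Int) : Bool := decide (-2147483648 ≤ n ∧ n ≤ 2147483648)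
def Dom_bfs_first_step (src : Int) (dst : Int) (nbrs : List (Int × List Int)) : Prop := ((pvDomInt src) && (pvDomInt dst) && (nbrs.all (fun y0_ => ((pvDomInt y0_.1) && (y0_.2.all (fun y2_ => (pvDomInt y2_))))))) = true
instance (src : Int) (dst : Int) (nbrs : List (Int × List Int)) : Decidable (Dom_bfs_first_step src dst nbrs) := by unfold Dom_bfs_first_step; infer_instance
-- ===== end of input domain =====

-- B is a level-synchronous BFS whose frontier carries (node, first-step) pairs over a
-- plain seen-set, removing A's parent dictionary and backtracking pass (objective: alternative).

-- ===== PORT A =====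
-- The Python dict 'seen' only ever gains FRESH keys (guarded by 'v not in seen'), so it
-- is ported exactly as an append-ordered association list with first-match lookup.
-- 'seen[prev]' on the parent chain (key always present there) is (seen.lookup prev).join.
-- The backtracking 'while' and the BFS 'while q' are ported with a fuel counter that is
-- a totality guard only: seen.length resp. 1 + total neighbour count always suffice.

def aBack (seen : List (Int × Option Int)) : Nat → Int → Int → Int
  | 0, cur, _ => cur
  | fuel + 1, cur, prev =>
    match (seen.lookup prev).join with
    | none => cur
    | some p => aBack seen fuel prev p

def aInner (dst u : Int) : List Int → List Int → List (Int × Option Int) →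
    Option Int × List Int × List (Int × Option Int)
  | [], q, seen => (none, q, seen)
  | v :: vs, q, seen =>
    if (seen.lookup v).isSome then aInner dst u vs q seen
    else
      let seen' := seen ++ [(v, some u)]
      if v = dst then (some (aBack seen' seen'.length v u), q, seen')
      else aInner dst u vs (q ++ [v]) seen'

def aLoop (dst : Int) (nbrs : List (Int × List Int)) :
    Nat → List Int → List (Int × Option Int) → Option Int
  | 0, _, _ => none
  | _ + 1, [], _ => none
  | fuel + 1, u :: q, seen =>
    match aInner dst u ((nbrs.lookup u).getD []) q seen with
    | (some r, _, _) => some r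
    | (none, q', seen') => aLoop dst nbrs fuel q' seen'

def bfs_first_step (src : Int) (dst : Int) (nbrs : List (Int × List Int)) : Int :=
  if src = dst then src
  else
    match aLoop dst nbrs (1 + (nbrs.map (fun p => p.2.length)).sum) [src] [(src, none)] with
    | some r => r
    | none => src

-- ===== PORT B =====
-- Level-synchronous BFS: 'seen' is a PySem.Set, the frontier is a list of
-- (node, first-step) pairs; 'while frontier' is guarded by the same fuel bound
-- 1 + total neighbour count, which always suffices (totality guard only).

-- level-0 loop: 'for v in nbrs.get(src, ())' seeding the frontier with (v, v)
def bLevel0 (dst : Int) : List Int → PySem.Set Int → List (Int × Int) →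
    Option Int × PySem.Set Int × List (Int × Int)
  | [], seen, frontier => (none, seen, frontier)
  | v :: vs, seen, frontier =>
    if PySem.Set.contains seen v then bLevel0 dst vs seen frontier
    else
      let seen' := PySem.Set.add seen v
      if v = dst then (some v, seen', frontier)
      else bLevel0 dst vs seen' (frontier ++ [(v, v)])

-- inner loop: 'for v in nbrs.get(u, ())' for one frontier pair (u, step)
def bNode (dst step : Int) : List Int → PySem.Set Int → List (Int × Int) →
    Option Int × PySem.Set Int × List (Int × Int)
  | [], seen, nxt => (none, seen, nxt)
  | v :: vs, seen, nxt =>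
    if PySem.Set.contains seen v then bNode dst step vs seen nxt
    else
      let seen' := PySem.Set.add seen v
      if v = dst then (some step, seen', nxt)
      else bNode dst step vs seen' (nxt ++ [(v, step)])

-- middle loop: 'for u, step in frontier'
def bFront (dst : Int) (nbrs : List (Int × List Int)) :
    List (Int × Int) → PySem.Set Int → List (Int × Int) →
    Option Int × PySem.Set Int × List (Int × Int)
  | [], seen, nxt => (none, seen, nxt)
  | (u, step) :: rest, seen, nxt =>
    match bNode dst step ((nbrs.lookup u).getD []) seen nxt with
    | (some r, seen', nxt') => (some r, seen', nxt')
    | (none, seen', nxt') => bFront dst nbrs rest seen' nxt'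

-- outer loop: 'while frontier'
def bLoop (dst : Int) (nbrs : List (Int × List Int)) :
    Nat → List (Int × Int) → PySem.Set Int → Option Int
  | 0, _, _ => none
  | _ + 1, [], _ => none
  | fuel + 1, p :: frontier, seen =>
    match bFront dst nbrs (p :: frontier) seen [] with
    | (some r, _, _) => some r
    | (none, seen', nxt) => bLoop dst nbrs fuel nxt seen'

def bfs_first_step_alt (src : Int) (dst : Int) (nbrs : List (Int × List Int)) : Int :=
  if src = dst then src
  else
    match bLevel0 dst ((nbrs.lookup src).getD []) (PySem.Set.ofList [src]) [] with
    | (some r, _, _) => r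
    | (none, seen, frontier) =>
      match bLoop dst nbrs (1 + (nbrs.map (fun p => p.2.length)).sum) frontier seen with
      | some r => r
      | none => src

-- ===== PRECONDITION & SPEC =====
def Spec_bfs_first_step (src : Int) (dst : Int) (nbrs : List (Int × List Int)) (out : Int) : Prop := out = bfs_first_step_alt src dst nbrs
instance (src : Int) (dst : Int) (nbrs : List (Int × List Int)) (out : Int) : Decidable (Spec_bfs_first_step src dst nbrs out) := by unfold Spec_bfs_first_step; infer_instance

-- ===== CLAIM (what is proved, stated in full; the proofs are below) =====
def Claim_equal_bfs_first_step : Prop := ∀ (src : Int) (dst : Int) (nbrs : List (Int × List Int)), Dom_bfs_first_step src dst nbrs → Spec_bfs_first_step src dst nbrs (bfs_first_step src dst nbrs)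

-- ===== LEMMAS AND PROOFS =====

-- Proof-side intermediate M: the same BFS queue as A, but the dictionary maps each
-- discovered node to the FIRST STEP on its path from src.  Part 1 below proves A = M
-- (parent map + backtracking computes the first-step label); Part 2 proves M = B
-- (the queue of a FIFO BFS is exactly the current frontier remainder followed by the
-- next frontier, so the level-synchronous B visits the same nodes in the same order).

def mInner (src dst u : Int) : List Int → List Int → List (Int × Int) →
    Option Int × List Int × List (Int × Int)
  | [], q, first => (none, q, first)
  | v :: vs, q, first =>
    if (first.lookup v).isSome then mInner src dst u vs q first
    else
      let step := if u = src then v else (first.lookup u).getD 0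
      if v = dst then (some step, q, first)
      else mInner src dst u vs (q ++ [v]) (first ++ [(v, step)])

def mLoop (src dst : Int) (nbrs : List (Int × List Int)) :
    Nat → List Int → List (Int × Int) → Option Int
  | 0, _, _ => none
  | _ + 1, [], _ => none
  | fuel + 1, u :: q, first =>
    match mInner src dst u ((nbrs.lookup u).getD []) q first with
    | (some r, _, _) => some r
    | (none, q', first') => mLoop src dst nbrs fuel q' first'

-- ---------- Part 1: A = M ----------

def CInv (src : Int) (sa : List (Int × Option Int)) (fb : List (Int × Int)) : Prop :=
  sa.map Prod.fst = fb.map Prod.fst ∧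
  (sa.map Prod.fst).Nodup ∧
  sa.lookup src = some none ∧
  fb.lookup src = some src ∧
  (∀ (i : Nat) (v : Int), sa[i]? = some (v, Option.none) → v = src) ∧
  (∀ (i : Nat) (v pu : Int), sa[i]? = some (v, some pu) →
    ∃ (j : Nat) (w : Option Int) (s t : Int), j < i ∧ sa[j]? = some (pu, w) ∧ fb[i]? = some (v, s) ∧ fb[j]? = some (pu, t) ∧
      s = if pu = src then v else t)

theorem lookup_of_getElem? {α β : Type} [BEq α] [LawfulBEq α] (l : List (α × β))
    (h : (l.map Prod.fst).Nodup) {j : Nat} {u : α} {w : β} (hj : l[j]? = some (u, w)) :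
    l.lookup u = some w := by
  induction l generalizing j with
  | nil => simp at hj
  | cons p l ih =>
    simp at h
    cases j with
    | zero => simp at hj; rw [hj]; simp [List.lookup]
    | succ j =>
      simp at hj
      have hmem : u ∈ l.map Prod.fst :=
        List.mem_map.2 ⟨(u, w), List.mem_of_getElem? hj, rfl⟩
      have hne : (u == p.1) = false := by
        refine beq_eq_false_iff_ne.2 (fun e => ?_)
        obtain ⟨⟨a, b⟩, hb, hfst⟩ := List.mem_map.1 hmem
        simp at hfst
        rw [hfst, e] at hb
        exact h.1 b hb
      simp [List.lookup, hne, ih h.2 hj]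

theorem getElem?_of_lookup {α β : Type} [BEq α] [LawfulBEq α] (l : List (α × β))
    {u : α} {w : β} (h : l.lookup u = some w) : ∃ j : Nat, l[j]? = some (u, w) := by
  induction l with
  | nil => simp [List.lookup] at h
  | cons p l ih =>
    rw [List.lookup] at h
    by_cases he : u = p.1
    · rw [beq_iff_eq.2 he] at h
      simp at h
      exact ⟨0, by simp [he, ← h]⟩
    · rw [beq_eq_false_iff_ne.2 he] at h
      obtain ⟨j, hj⟩ := ih h
      exact ⟨j + 1, by simpa using hj⟩

theorem lookup_isSome_iff {α β : Type} [BEq α] [LawfulBEq α] (l : List (α × β))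
    (u : α) : (l.lookup u).isSome ↔ u ∈ l.map Prod.fst := by
  induction l with
  | nil => simp [List.lookup]
  | cons p l ih =>
    rw [List.lookup]
    by_cases he : u = p.1
    · rw [beq_iff_eq.2 he]; simp [he]
    · rw [beq_eq_false_iff_ne.2 he]
      simp only [List.map_cons, List.mem_cons, ih]
      constructor
      · exact Or.inr
      · rintro (h | h)
        · exact absurd h he
        · exact h

theorem getElem?_snd_of_keys {α β γ : Type} (l₁ : List (α × β)) (l₂ : List (α × γ))
    (hkeys : l₁.map Prod.fst = l₂.map Prod.fst) {j : Nat} {u : α} {w : β}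
    (hj : l₁[j]? = some (u, w)) : ∃ t : γ, l₂[j]? = some (u, t) := by
  have h1 : (l₂.map Prod.fst)[j]? = some u := by
    rw [← hkeys]; simp [hj]
  rw [List.getElem?_map] at h1
  cases h2 : l₂[j]? with
  | none => rw [h2] at h1; simp at h1
  | some p =>
    rw [h2] at h1; simp at h1
    exact ⟨p.2, by rw [← h1]⟩

theorem aBack_eq (src : Int) (sa : List (Int × Option Int)) (fb : List (Int × Int))
    (hInv : CInv src sa fb) :
    ∀ (fuel j : Nat) (cur prev : Int) (w : Option Int) (s : Int), j < fuel →
      sa[j]? = some (prev, w) → fb[j]? = some (prev, s) →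
      aBack sa fuel cur prev = if prev = src then cur else s := by
  obtain ⟨hkeys, hnd, hlsrc, hfsrc, hnone, hsome⟩ := hInv
  intro fuel
  induction fuel with
  | zero => intro j _ _ _ _ hj; omega
  | succ fuel ih =>
    intro j cur prev w s hj hsa hfb
    have hlk : sa.lookup prev = some w := lookup_of_getElem? sa hnd hsa
    cases w with
    | none =>
      have hps : prev = src := hnone j prev hsa
      rw [aBack, hlk]
      simp [hps]
    | some p =>
      have hps : prev ≠ src := by
        intro e; rw [e, hlsrc] at hlk; simp at hlk
      obtain ⟨j', w', s', t', hj'lt, hsaj', hfbj, hfbj', hs⟩ := hsome j prev p hsa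
      have hss : s' = s := by
        rw [hfb] at hfbj; simp at hfbj; exact hfbj.symm
      rw [aBack, hlk]
      show aBack sa fuel prev p = _
      rw [ih j' prev p w' t' (by omega) hsaj' hfbj']
      rw [if_neg hps, ← hss, hs]

theorem CInv_snoc (src u v : Int) (sa : List (Int × Option Int)) (fb : List (Int × Int))
    (hInv : CInv src sa fb) (hv : v ∉ sa.map Prod.fst)
    {j : Nat} {wu : Option Int} {su : Int}
    (hjsa : sa[j]? = some (u, wu)) (hjfb : fb[j]? = some (u, su)) :
    CInv src (sa ++ [(v, some u)]) (fb ++ [(v, if u = src then v else su)]) := by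
  obtain ⟨hkeys, hnd, hlsrc, hfsrc, hnone, hsome⟩ := hInv
  have hlen : sa.length = fb.length := by
    have := congrArg List.length hkeys; simpa using this
  have hjlt : j < sa.length := (List.getElem?_eq_some_iff.mp hjsa).1
  have hsrcmem : src ∈ sa.map Prod.fst :=
    (lookup_isSome_iff sa src).1 (by rw [hlsrc]; rfl)
  refine ⟨by simp [hkeys], by rw [List.map_append]; exact List.Nodup.append hnd (List.nodup_singleton v) (by simp [List.disjoint_singleton, hv]), ?_, ?_, ?_, ?_⟩
  · rw [List.lookup_append, hlsrc]; rfl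
  · rw [List.lookup_append, hfsrc]; rfl
  · intro i x hix
    rcases Nat.lt_trichotomy i sa.length with hi | hi | hi
    · exact hnone i x (by rwa [List.getElem?_append_left hi] at hix)
    · subst hi
      rw [List.getElem?_concat_length] at hix
      simp at hix
    · rw [List.getElem?_eq_none_iff.mpr (by simp; omega)] at hix
      exact absurd hix (by simp)
  · intro i x pu hix
    rcases Nat.lt_trichotomy i sa.length with hi | hi | hi
    · rw [List.getElem?_append_left hi] at hix
      obtain ⟨j', w', s', t', hj'lt, h1, h2, h3, h4⟩ := hsome i x pu hix
      have hj'l : j' < sa.length := (List.getElem?_eq_some_iff.mp h1).1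
      have hil : i < fb.length := by omega
      have hj'lb : j' < fb.length := by omega
      exact ⟨j', w', s', t', hj'lt,
        by rw [List.getElem?_append_left hj'l]; exact h1,
        by rw [List.getElem?_append_left hil]; exact h2,
        by rw [List.getElem?_append_left hj'lb]; exact h3, h4⟩
    · subst hi
      rw [List.getElem?_concat_length] at hix
      simp at hix
      obtain ⟨hxv, hpu⟩ := hix
      refine ⟨j, wu, if u = src then v else su, su, hjlt,
        by rw [List.getElem?_append_left hjlt, ← hpu]; exact hjsa,
        ?_, by rw [List.getElem?_append_left (by omega : j < fb.length), ← hpu]; exact hjfb,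
        by rw [← hpu, ← hxv]⟩
      rw [hlen, List.getElem?_concat_length, hxv]
    · rw [List.getElem?_eq_none_iff.mpr (by simp; omega)] at hix
      exact absurd hix (by simp)

theorem inner_eq (src dst u : Int) :
    ∀ (vs q : List Int) (sa : List (Int × Option Int)) (fb : List (Int × Int)),
      CInv src sa fb → u ∈ sa.map Prod.fst → (∀ x ∈ q, x ∈ sa.map Prod.fst) →
      ∃ r q' sa' fb',
        aInner dst u vs q sa = (r, q', sa') ∧
        mInner src dst u vs q fb = (r, q', fb') ∧
        (r = none →
          CInv src sa' fb' ∧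
          (∃ ext, sa'.map Prod.fst = sa.map Prod.fst ++ ext) ∧
          (∀ x ∈ q', x ∈ sa'.map Prod.fst)) := by
  intro vs
  induction vs with
  | nil =>
    intro q sa fb hInv hu hq
    exact ⟨none, q, sa, fb, rfl, rfl, fun _ => ⟨hInv, ⟨[], by simp⟩, hq⟩⟩
  | cons v vs ih =>
    intro q sa fb hInv hu hq
    have hkeys := hInv.1
    by_cases hv : v ∈ sa.map Prod.fst
    · have ha : (sa.lookup v).isSome = true := (lookup_isSome_iff sa v).2 hv
      have hb : (fb.lookup v).isSome = true := (lookup_isSome_iff fb v).2 (hkeys ▸ hv)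
      obtain ⟨r, q', sa', fb', hA, hB, hrest⟩ := ih q sa fb hInv hu hq
      refine ⟨r, q', sa', fb', ?_, ?_, hrest⟩
      · rw [aInner, if_pos ha]; exact hA
      · rw [mInner, if_pos hb]; exact hB
    · have ha : (sa.lookup v).isSome = false :=
        Bool.eq_false_iff.2 (fun h => hv ((lookup_isSome_iff sa v).1 h))
      have hb : (fb.lookup v).isSome = false :=
        Bool.eq_false_iff.2 (fun h => hv (hkeys ▸ (lookup_isSome_iff fb v).1 h))
      obtain ⟨wu, hwu⟩ := Option.isSome_iff_exists.1 ((lookup_isSome_iff sa u).2 hu)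
      obtain ⟨j, hjsa⟩ := getElem?_of_lookup sa hwu
      obtain ⟨su, hjfb⟩ := getElem?_snd_of_keys sa fb hkeys hjsa
      have hlu : fb.lookup u = some su := lookup_of_getElem? fb (hkeys ▸ hInv.2.1) hjfb
      have hjlta : j < sa.length := (List.getElem?_eq_some_iff.mp hjsa).1
      have hjltb : j < fb.length := (List.getElem?_eq_some_iff.mp hjfb).1
      have hInv' : CInv src (sa ++ [(v, some u)]) (fb ++ [(v, if u = src then v else su)]) :=
        CInv_snoc src u v sa fb hInv hv hjsa hjfb
      by_cases hd : v = dst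
      · have hback : aBack (sa ++ [(v, some u)]) (sa ++ [(v, some u)]).length v u
            = if u = src then v else su :=
          aBack_eq src (sa ++ [(v, some u)]) (fb ++ [(v, if u = src then v else su)]) hInv'
            (sa ++ [(v, some u)]).length j v u wu su (by simp; omega)
            (List.getElem?_append_left hjlta ▸ hjsa)
            (List.getElem?_append_left hjltb ▸ hjfb)
        refine ⟨some (if u = src then v else su), q, sa ++ [(v, some u)], fb, ?_, ?_,
          by intro h; cases h⟩
        · rw [aInner, if_neg (by simp [ha])]
          simp only [if_pos hd, hback]
        · rw [mInner, if_neg (by simp [hb])]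
          simp only [if_pos hd, hlu, Option.getD_some]
      · obtain ⟨r, q', sa', fb', hA, hB, hrest⟩ :=
          ih (q ++ [v]) (sa ++ [(v, some u)]) (fb ++ [(v, if u = src then v else su)]) hInv'
            (by simp; exact Or.inl (by simpa using hu))
            (by intro x hx; simp at hx ⊢
                rcases hx with hx | hx
                · exact Or.inl (by simpa using hq x hx)
                · exact Or.inr hx)
        refine ⟨r, q', sa', fb', ?_, ?_, ?_⟩
        · rw [aInner, if_neg (by simp [ha])]
          simp only [if_neg hd]
          exact hA
        · rw [mInner, if_neg (by simp [hb])]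
          simp only [if_neg hd, hlu, Option.getD_some]
          exact hB
        · intro h
          obtain ⟨hI, ⟨ext, hext⟩, hq'⟩ := hrest h
          exact ⟨hI, ⟨v :: ext, by rw [hext]; simp⟩, hq'⟩

theorem loop_eq (src dst : Int) (nbrs : List (Int × List Int)) :
    ∀ (fuel : Nat) (q : List Int) (sa : List (Int × Option Int)) (fb : List (Int × Int)),
      CInv src sa fb → (∀ x ∈ q, x ∈ sa.map Prod.fst) →
      aLoop dst nbrs fuel q sa = mLoop src dst nbrs fuel q fb := by
  intro fuel
  induction fuel with
  | zero => intro q sa fb _ _; rfl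
  | succ fuel ih =>
    intro q sa fb hInv hq
    cases q with
    | nil => rfl
    | cons u q =>
      obtain ⟨r, q', sa', fb', hA, hB, hrest⟩ :=
        inner_eq src dst u ((nbrs.lookup u).getD []) q sa fb hInv
          (hq u (by simp)) (fun x hx => hq x (by simp [hx]))
      rw [aLoop, mLoop, hA, hB]
      cases r with
      | some r => rfl
      | none =>
        obtain ⟨hInv', _, hq'⟩ := hrest rfl
        exact ih q' sa' fb' hInv' hq'

-- ---------- Part 2: M = B ----------

def allNodes (src : Int) (nbrs : List (Int × List Int)) : List Int :=
  src :: nbrs.flatMap Prod.snd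

def MInv (src : Int) (nbrs : List (Int × List Int)) (fb : List (Int × Int)) : Prop :=
  (fb.map Prod.fst).Nodup ∧ fb.lookup src = some src ∧
  ∀ k ∈ fb.map Prod.fst, k ∈ allNodes src nbrs

def PairsOk (src : Int) (fb : List (Int × Int)) (P : List (Int × Int)) : Prop :=
  ∀ p ∈ P, fb.lookup p.1 = some p.2 ∧ p.1 ≠ src

-- B's state mid-level: remaining frontier P, accumulated next frontier X, fl levels left
def bStage (dst : Int) (nbrs : List (Int × List Int)) (fl : Nat)
    (P X : List (Int × Int)) (seen : PySem.Set Int) : Option Int :=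
  match bFront dst nbrs P seen X with
  | (some r, _, _) => some r
  | (none, seen', nxt) => bLoop dst nbrs fl nxt seen'

theorem lookup_append_some {β : Type} (l l' : List (Int × β)) {k : Int} {v : β}
    (h : l.lookup k = some v) : (l ++ l').lookup k = some v := by
  rw [List.lookup_append, h]; rfl

theorem lookup_mem_nodup {β : Type} (l : List (Int × β))
    (h : (l.map Prod.fst).Nodup) {k : Int} {v : β} (hm : (k, v) ∈ l) :
    l.lookup k = some v := by
  obtain ⟨j, hj, he⟩ := List.getElem_of_mem hm
  exact lookup_of_getElem? l h (by rw [List.getElem?_eq_getElem hj, he])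

theorem nodup_length_le (l m : List Int) (h : l.Nodup) (hs : ∀ x ∈ l, x ∈ m) :
    l.length ≤ m.length := by
  calc l.length = l.toFinset.card := (List.toFinset_card_of_nodup h).symm
    _ ≤ m.toFinset.card := Finset.card_le_card (by
        intro x hx
        rw [List.mem_toFinset] at hx ⊢
        exact hs x hx)
    _ ≤ m.length := m.toFinset_card_le

theorem mem_of_lookup_some {β : Type} (l : List (Int × β)) {k : Int} {v : β}
    (h : l.lookup k = some v) : (k, v) ∈ l := by
  induction l with
  | nil => simp [List.lookup] at h
  | cons p t ih =>
    obtain ⟨a, b⟩ := p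
    rw [List.lookup] at h
    by_cases he : k = a
    · rw [beq_iff_eq.2 he] at h
      simp at h
      rw [he, ← h]
      exact List.mem_cons_self
    · rw [beq_eq_false_iff_ne.2 he] at h
      exact List.mem_cons_of_mem (a, b) (ih h)

theorem mem_neighbors_allNodes (src u : Int) (nbrs : List (Int × List Int)) {v : Int}
    (hv : v ∈ (nbrs.lookup u).getD []) : v ∈ allNodes src nbrs := by
  cases h : nbrs.lookup u with
  | none => rw [h] at hv; simp at hv
  | some l =>
    rw [h] at hv
    simp at hv
    exact List.mem_cons_of_mem src (List.mem_flatMap.2 ⟨(u, l), mem_of_lookup_some nbrs h, hv⟩)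

theorem allNodes_length (src : Int) (nbrs : List (Int × List Int)) :
    (allNodes src nbrs).length = 1 + (nbrs.map (fun p => p.2.length)).sum := by
  simp [allNodes, List.length_flatMap]
  omega

theorem bNode_eq (src dst u s : Int) (nbrs : List (Int × List Int)) (hu : u ≠ src) :
    ∀ (vs q₀ : List Int) (X fb : List (Int × Int)),
      MInv src nbrs fb → (∀ v ∈ vs, v ∈ allNodes src nbrs) →
      fb.lookup u = some s →
      (∃ r qx fx sx nx, mInner src dst u vs q₀ fb = (some r, qx, fx) ∧
          bNode dst s vs (fb.map Prod.fst) X = (some r, sx, nx)) ∨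
      (∃ Δ, mInner src dst u vs q₀ fb = (none, q₀ ++ Δ.map Prod.fst, fb ++ Δ) ∧
          bNode dst s vs (fb.map Prod.fst) X = (none, (fb ++ Δ).map Prod.fst, X ++ Δ) ∧
          MInv src nbrs (fb ++ Δ) ∧ (∀ p ∈ Δ, p.1 ≠ src)) := by
  intro vs
  induction vs with
  | nil =>
    intro q₀ X fb hI _ _
    exact Or.inr ⟨[], by simp [mInner], by simp [bNode], by simpa using hI, by simp⟩
  | cons v vs ih =>
    intro q₀ X fb hI hvs hus
    obtain ⟨hnd, hsrc, hsub⟩ := hI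
    by_cases hv : v ∈ fb.map Prod.fst
    · have hm : (fb.lookup v).isSome = true := (lookup_isSome_iff fb v).2 hv
      have hc : PySem.Set.contains (fb.map Prod.fst) v = true :=
        (PySem.Set.contains_iff _ _).2 hv
      rcases ih q₀ X fb ⟨hnd, hsrc, hsub⟩ (fun x hx => hvs x (by simp [hx])) hus with
        ⟨r, qx, fx, sx, nx, h1, h2⟩ | ⟨Δ, h1, h2, h3, h4⟩
      · exact Or.inl ⟨r, qx, fx, sx, nx, by rw [mInner, if_pos hm]; exact h1,
          by rw [bNode, if_pos hc]; exact h2⟩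
      · exact Or.inr ⟨Δ, by rw [mInner, if_pos hm]; exact h1,
          by rw [bNode, if_pos hc]; exact h2, h3, h4⟩
    · have hm : (fb.lookup v).isSome = false :=
        Bool.eq_false_iff.2 (fun h => hv ((lookup_isSome_iff fb v).1 h))
      have hc : PySem.Set.contains (fb.map Prod.fst) v = false := by
        refine Bool.eq_false_iff.2 (fun h => hv ((PySem.Set.contains_iff _ _).1 h))
      have hadd : PySem.Set.add (fb.map Prod.fst) v = fb.map Prod.fst ++ [v] :=
        PySem.Set.add_of_not_mem hv
      have hvp : ∀ x : Int, (v, x) ∉ fb :=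
        fun x hx => hv (List.mem_map.2 ⟨(v, x), hx, rfl⟩)
      have hstep : (if u = src then v else (fb.lookup u).getD 0) = s := by
        rw [if_neg hu, hus]; rfl
      have hvsrc : v ≠ src := by
        intro e
        exact hv (e ▸ (lookup_isSome_iff fb src).1 (by rw [hsrc]; rfl))
      by_cases hd : v = dst
      · refine Or.inl ⟨s, q₀, fb, PySem.Set.add (fb.map Prod.fst) v, X, ?_, ?_⟩
        · rw [mInner, if_neg (by simp [hm])]
          simp only [hstep, if_pos hd]
        · rw [bNode, if_neg (by simp [hvp])]
          simp only [if_pos hd]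
      · have hI' : MInv src nbrs (fb ++ [(v, s)]) := by
          refine ⟨by rw [List.map_append]
                     exact List.Nodup.append hnd (List.nodup_singleton v)
                       (by simp [List.disjoint_singleton, hv]),
            lookup_append_some fb _ hsrc, ?_⟩
          intro k hk
          rw [List.map_append] at hk
          rcases List.mem_append.1 hk with hk | hk
          · exact hsub k hk
          · simp at hk
            exact hk ▸ hvs v (by simp)
        have hus' : (fb ++ [(v, s)]).lookup u = some s := lookup_append_some fb _ hus
        rcases ih (q₀ ++ [v]) (X ++ [(v, s)]) (fb ++ [(v, s)]) hI'
            (fun x hx => hvs x (by simp [hx])) hus' with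
          ⟨r, qx, fx, sx, nx, h1, h2⟩ | ⟨Δ, h1, h2, h3, h4⟩
        · refine Or.inl ⟨r, qx, fx, sx, nx, ?_, ?_⟩
          · rw [mInner, if_neg (by simp [hm])]
            simp only [hstep, if_neg hd]
            exact h1
          · rw [bNode, if_neg (by simp [hvp])]
            simp only [if_neg hd, hadd]
            rw [show (fb.map Prod.fst ++ [v]) = (fb ++ [(v, s)]).map Prod.fst by simp]
            exact h2
        · refine Or.inr ⟨(v, s) :: Δ, ?_, ?_, by simpa using h3, ?_⟩
          · rw [mInner, if_neg (by simp [hm])]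
            simp only [hstep, if_neg hd]
            rw [h1]
            simp
          · rw [bNode, if_neg (by simp [hvp])]
            simp only [if_neg hd, hadd]
            rw [show (fb.map Prod.fst ++ [v]) = (fb ++ [(v, s)]).map Prod.fst by simp]
            rw [h2]
            simp
          · intro p hp
            rcases List.mem_cons.1 hp with hp | hp
            · rw [hp]; exact hvsrc
            · exact h4 p hp

theorem bLevel0_eq (src dst : Int) (nbrs : List (Int × List Int)) :
    ∀ (vs q₀ : List Int) (X fb : List (Int × Int)),
      MInv src nbrs fb → (∀ v ∈ vs, v ∈ allNodes src nbrs) →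
      (∃ r qx fx sx nx, mInner src dst src vs q₀ fb = (some r, qx, fx) ∧
          bLevel0 dst vs (fb.map Prod.fst) X = (some r, sx, nx)) ∨
      (∃ Δ, mInner src dst src vs q₀ fb = (none, q₀ ++ Δ.map Prod.fst, fb ++ Δ) ∧
          bLevel0 dst vs (fb.map Prod.fst) X = (none, (fb ++ Δ).map Prod.fst, X ++ Δ) ∧
          MInv src nbrs (fb ++ Δ) ∧ (∀ p ∈ Δ, p.1 ≠ src)) := by
  intro vs
  induction vs with
  | nil =>
    intro q₀ X fb hI _
    exact Or.inr ⟨[], by simp [mInner], by simp [bLevel0], by simpa using hI, by simp⟩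
  | cons v vs ih =>
    intro q₀ X fb hI hvs
    obtain ⟨hnd, hsrc, hsub⟩ := hI
    by_cases hv : v ∈ fb.map Prod.fst
    · have hm : (fb.lookup v).isSome = true := (lookup_isSome_iff fb v).2 hv
      have hc : PySem.Set.contains (fb.map Prod.fst) v = true :=
        (PySem.Set.contains_iff _ _).2 hv
      rcases ih q₀ X fb ⟨hnd, hsrc, hsub⟩ (fun x hx => hvs x (by simp [hx])) with
        ⟨r, qx, fx, sx, nx, h1, h2⟩ | ⟨Δ, h1, h2, h3, h4⟩
      · exact Or.inl ⟨r, qx, fx, sx, nx, by rw [mInner, if_pos hm]; exact h1,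
          by rw [bLevel0, if_pos hc]; exact h2⟩
      · exact Or.inr ⟨Δ, by rw [mInner, if_pos hm]; exact h1,
          by rw [bLevel0, if_pos hc]; exact h2, h3, h4⟩
    · have hm : (fb.lookup v).isSome = false :=
        Bool.eq_false_iff.2 (fun h => hv ((lookup_isSome_iff fb v).1 h))
      have hc : PySem.Set.contains (fb.map Prod.fst) v = false := by
        refine Bool.eq_false_iff.2 (fun h => hv ((PySem.Set.contains_iff _ _).1 h))
      have hadd : PySem.Set.add (fb.map Prod.fst) v = fb.map Prod.fst ++ [v] :=
        PySem.Set.add_of_not_mem hv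
      have hvp : ∀ x : Int, (v, x) ∉ fb :=
        fun x hx => hv (List.mem_map.2 ⟨(v, x), hx, rfl⟩)
      have hvsrc : v ≠ src := by
        intro e
        exact hv (e ▸ (lookup_isSome_iff fb src).1 (by rw [hsrc]; rfl))
      by_cases hd : v = dst
      · refine Or.inl ⟨v, q₀, fb, PySem.Set.add (fb.map Prod.fst) v, X, ?_, ?_⟩
        · rw [mInner, if_neg (by simp [hm])]
          simp [hd]
        · rw [bLevel0, if_neg (by simp [hvp])]
          simp only [if_pos hd]
      · have hI' : MInv src nbrs (fb ++ [(v, v)]) := by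
          refine ⟨by rw [List.map_append]
                     exact List.Nodup.append hnd (List.nodup_singleton v)
                       (by simp [List.disjoint_singleton, hv]),
            lookup_append_some fb _ hsrc, ?_⟩
          intro k hk
          rw [List.map_append] at hk
          rcases List.mem_append.1 hk with hk | hk
          · exact hsub k hk
          · simp at hk
            exact hk ▸ hvs v (by simp)
        rcases ih (q₀ ++ [v]) (X ++ [(v, v)]) (fb ++ [(v, v)]) hI'
            (fun x hx => hvs x (by simp [hx])) with
          ⟨r, qx, fx, sx, nx, h1, h2⟩ | ⟨Δ, h1, h2, h3, h4⟩
        · refine Or.inl ⟨r, qx, fx, sx, nx, ?_, ?_⟩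
          · rw [mInner, if_neg (by simp [hm])]
            simp only [if_neg hd]
            simp only [if_true]
            exact h1
          · rw [bLevel0, if_neg (by simp [hvp])]
            simp only [if_neg hd, hadd]
            rw [show (fb.map Prod.fst ++ [v]) = (fb ++ [(v, v)]).map Prod.fst by simp]
            exact h2
        · refine Or.inr ⟨(v, v) :: Δ, ?_, ?_, by simpa using h3, ?_⟩
          · rw [mInner, if_neg (by simp [hm])]
            simp only [if_neg hd]
            simp only [if_true]
            rw [h1]
            simp
          · rw [bLevel0, if_neg (by simp [hvp])]
            simp only [if_neg hd, hadd]
            rw [show (fb.map Prod.fst ++ [v]) = (fb ++ [(v, v)]).map Prod.fst by simp]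
            rw [h2]
            simp
          · intro p hp
            rcases List.mem_cons.1 hp with hp | hp
            · rw [hp]; exact hvsrc
            · exact h4 p hp

theorem stage_eq (src dst : Int) (nbrs : List (Int × List Int)) :
    ∀ (n fm fl : Nat) (P X fb : List (Int × Int)),
      fm + fl ≤ n →
      MInv src nbrs fb →
      PairsOk src fb (P ++ X) →
      (P ++ X).length + ((allNodes src nbrs).length - fb.length) ≤ fm →
      fm < fl + 1 + P.length →
      mLoop src dst nbrs fm (P.map Prod.fst ++ X.map Prod.fst) fb =
        bStage dst nbrs fl P X (fb.map Prod.fst) := by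
  intro n
  induction n with
  | zero =>
    intro fm fl P X fb hn hI hPX hfuel hfl
    have hfm : fm = 0 := by omega
    have hfl0 : fl = 0 := by omega
    subst hfm; subst hfl0
    have hlen : (P ++ X).length = 0 := by omega
    simp only [List.length_append, Nat.add_eq_zero_iff, List.length_eq_zero_iff] at hlen
    obtain ⟨hP, hX⟩ := hlen
    subst hP; subst hX
    rfl
  | succ n ih =>
    intro fm fl P X fb hn hI hPX hfuel hfl
    cases P with
    | nil =>
      cases X with
      | nil =>
        have h1 : mLoop src dst nbrs fm ([] : List Int) fb = none := by
          cases fm <;> rfl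
        have h2 : bStage dst nbrs fl ([] : List (Int × Int)) [] (fb.map Prod.fst) = none := by
          show (match bFront dst nbrs [] (fb.map Prod.fst) [] with
            | (some r, _, _) => some r
            | (none, seen', nxt) => bLoop dst nbrs fl nxt seen') = none
          rw [bFront]
          cases fl <;> rfl
        simp only [List.map_nil, List.nil_append]
        rw [h1, h2]
      | cons x X' =>
        have hlx : ([] ++ x :: X').length = X'.length + 1 := by simp
        have hfm1 : 1 ≤ fm := by omega
        have hfl1 : 1 ≤ fl := by simp at hfl; omega
        obtain ⟨fl', rfl⟩ : ∃ fl', fl = fl' + 1 := ⟨fl - 1, by omega⟩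
        have hstage : bStage dst nbrs (fl' + 1) ([] : List (Int × Int)) (x :: X') (fb.map Prod.fst)
            = bStage dst nbrs fl' (x :: X') [] (fb.map Prod.fst) := rfl
        rw [hstage]
        have := ih fm fl' (x :: X') [] fb (by omega) hI
          (by intro p hp; exact hPX p (by simpa using hp))
          (by simp at hfuel ⊢; omega)
          (by simp at hfl ⊢; omega)
        simpa using this
    | cons p P' =>
      obtain ⟨u, s⟩ := p
      have hfm1 : 1 ≤ fm := by
        simp at hfuel; omega
      obtain ⟨fm', rfl⟩ : ∃ fm', fm = fm' + 1 := ⟨fm - 1, by omega⟩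
      have hus : fb.lookup u = some s := (hPX (u, s) (by simp)).1
      have husrc : u ≠ src := (hPX (u, s) (by simp)).2
      have hvs : ∀ v ∈ (nbrs.lookup u).getD [], v ∈ allNodes src nbrs :=
        fun v hv => mem_neighbors_allNodes src u nbrs hv
      have hL : mLoop src dst nbrs (fm' + 1)
          (((u, s) :: P').map Prod.fst ++ X.map Prod.fst) fb =
          match mInner src dst u ((nbrs.lookup u).getD [])
              (P'.map Prod.fst ++ X.map Prod.fst) fb with
          | (some r, _, _) => some r
          | (none, q', fb') => mLoop src dst nbrs fm' q' fb' := by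
        rfl
      have hR : bStage dst nbrs fl ((u, s) :: P') X (fb.map Prod.fst) =
          match bNode dst s ((nbrs.lookup u).getD []) (fb.map Prod.fst) X with
          | (some r, _, _) => some r
          | (none, seen', nxt') =>
            bStage dst nbrs fl P' nxt' seen' := by
        show (match bFront dst nbrs ((u, s) :: P') (fb.map Prod.fst) X with
          | (some r, _, _) => some r
          | (none, seen', nxt) => bLoop dst nbrs fl nxt seen') = _
        rw [bFront]
        cases hb : bNode dst s ((nbrs.lookup u).getD []) (fb.map Prod.fst) X with
        | mk r rest =>
          obtain ⟨seen', nxt'⟩ := rest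
          cases r with
          | some r => rfl
          | none => rfl
      rw [hL, hR]
      rcases bNode_eq src dst u s nbrs husrc ((nbrs.lookup u).getD [])
          (P'.map Prod.fst ++ X.map Prod.fst) X fb hI hvs hus with
        ⟨r, qx, fx, sx, nx, h1, h2⟩ | ⟨Δ, h1, h2, h3, h4⟩
      · rw [h1, h2]
      · rw [h1, h2]
        show mLoop src dst nbrs fm' (P'.map Prod.fst ++ X.map Prod.fst ++ Δ.map Prod.fst) (fb ++ Δ) =
          bStage dst nbrs fl P' (X ++ Δ) ((fb ++ Δ).map Prod.fst)
        have hlen : (fb ++ Δ).length ≤ (allNodes src nbrs).length := by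
          have := nodup_length_le ((fb ++ Δ).map Prod.fst) (allNodes src nbrs) h3.1
            (fun x hx => h3.2.2 x hx)
          simpa using this
        have hPX' : PairsOk src (fb ++ Δ) (P' ++ (X ++ Δ)) := by
          intro p hp
          have hnd' := h3.1
          rcases List.mem_append.1 hp with hp | hp
          · obtain ⟨h5, h6⟩ := hPX p (by simp [hp])
            exact ⟨lookup_append_some fb Δ h5, h6⟩
          · rcases List.mem_append.1 hp with hp | hp
            · obtain ⟨h5, h6⟩ := hPX p (by simp [hp])
              exact ⟨lookup_append_some fb Δ h5, h6⟩
            · refine ⟨lookup_mem_nodup (fb ++ Δ) hnd' (by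
                  obtain ⟨p1, p2⟩ := p
                  exact List.mem_append.2 (Or.inr hp)), h4 p hp⟩
        have hfuel' : (P' ++ (X ++ Δ)).length +
            ((allNodes src nbrs).length - (fb ++ Δ).length) ≤ fm' := by
          simp at hfuel hlen ⊢
          omega
        have := ih fm' fl P' (X ++ Δ) (fb ++ Δ) (by omega) h3 hPX' hfuel'
          (by simp at hfl ⊢; omega)
        rw [show P'.map Prod.fst ++ X.map Prod.fst ++ Δ.map Prod.fst
            = P'.map Prod.fst ++ (X ++ Δ).map Prod.fst by simp]
        exact this

-- initial CInv for A = M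
theorem CInv_init (src : Int) : CInv src [(src, none)] [(src, src)] := by
  refine ⟨rfl, by simp, by simp [List.lookup], by simp [List.lookup], ?_, ?_⟩
  · intro i v hi
    cases i with
    | zero => simp at hi; omega
    | succ i => simp at hi
  · intro i v pu hi
    cases i with
    | zero => simp at hi
    | succ i => simp at hi

theorem MInv_init (src : Int) (nbrs : List (Int × List Int)) :
    MInv src nbrs [(src, src)] := by
  refine ⟨by simp, by simp [List.lookup], ?_⟩
  intro k hk
  simp at hk
  simp [allNodes, hk]

-- ===== VERDICT (by name: the statement is the Claim_ definition above) =====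
theorem bfs_first_step_spec : Claim_equal_bfs_first_step := by
  intro src dst nbrs _
  unfold Spec_bfs_first_step bfs_first_step bfs_first_step_alt
  by_cases h : src = dst
  · simp [h]
  · simp only [h, if_false]
    have hA : aLoop dst nbrs (1 + (nbrs.map (fun p => p.2.length)).sum) [src] [(src, none)]
        = mLoop src dst nbrs (1 + (nbrs.map (fun p => p.2.length)).sum) [src] [(src, src)] := by
      refine loop_eq src dst nbrs _ [src] [(src, none)] [(src, src)] (CInv_init src) ?_
      intro x hx
      simp at hx
      simp [hx]
    rw [hA]
    set Sn := (nbrs.map (fun p => p.2.length)).sum with hS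
    have hcomm : 1 + Sn = Sn + 1 := Nat.add_comm 1 Sn
    rw [hcomm]
    have hofl : PySem.Set.ofList [src] = ([src] : List Int) :=
      PySem.Set.ofList_eq_self_of_nodup [src] (List.nodup_singleton src)
    have hkeys0 : ([(src, src)] : List (Int × Int)).map Prod.fst = [src] := rfl
    have hML : mLoop src dst nbrs (Sn + 1) [src] [(src, src)] =
        match mInner src dst src ((nbrs.lookup src).getD []) [] [(src, src)] with
        | (some r, _, _) => some r
        | (none, q', fb') => mLoop src dst nbrs Sn q' fb' := rfl
    rw [hML, hofl]
    have hvs0 : ∀ v ∈ (nbrs.lookup src).getD [], v ∈ allNodes src nbrs :=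
      fun v hv => mem_neighbors_allNodes src src nbrs hv
    rcases bLevel0_eq src dst nbrs ((nbrs.lookup src).getD []) [] [] [(src, src)]
        (MInv_init src nbrs) hvs0 with
      ⟨r, qx, fx, sx, nx, h1, h2⟩ | ⟨Δ, h1, h2, h3, h4⟩
    · rw [h1]
      rw [show ([src] : List Int) = ([(src, src)] : List (Int × Int)).map Prod.fst from rfl, h2]
    · rw [h1]
      rw [show ([src] : List Int) = ([(src, src)] : List (Int × Int)).map Prod.fst from rfl, h2]
      simp only [List.nil_append]
      cases hΔ : Δ with
      | nil =>
        subst hΔ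
        have hml : mLoop src dst nbrs Sn (([] : List (Int × Int)).map Prod.fst)
            ([(src, src)] ++ []) = none := by
          cases Sn <;> rfl
        have hbl : bLoop dst nbrs (Sn + 1) []
            (([(src, src)] ++ ([] : List (Int × Int))).map Prod.fst) = none := rfl
        rw [hml, hbl]
      | cons δ Δ' =>
        subst hΔ
        have hbl : bLoop dst nbrs (Sn + 1) (δ :: Δ') (([(src, src)] ++ δ :: Δ').map Prod.fst)
            = bStage dst nbrs Sn (δ :: Δ') [] (([(src, src)] ++ δ :: Δ').map Prod.fst) := rfl
        have hlen : ([(src, src)] ++ (δ :: Δ')).length ≤ (allNodes src nbrs).length := by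
          have := nodup_length_le (([(src, src)] ++ (δ :: Δ')).map Prod.fst)
            (allNodes src nbrs) h3.1 (fun x hx => h3.2.2 x hx)
          simpa using this
        have hN : (allNodes src nbrs).length = 1 + Sn := allNodes_length src nbrs
        have hPOk : PairsOk src ([(src, src)] ++ (δ :: Δ')) ((δ :: Δ') ++ []) := by
          intro p hp
          simp only [List.append_nil] at hp
          exact ⟨lookup_mem_nodup _ h3.1 (by
            obtain ⟨p1, p2⟩ := p
            exact List.mem_append.2 (Or.inr hp)), h4 p hp⟩
        have h5 : mLoop src dst nbrs Sn ((δ :: Δ').map Prod.fst) ([(src, src)] ++ δ :: Δ')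
            = bStage dst nbrs Sn (δ :: Δ') [] (([(src, src)] ++ δ :: Δ').map Prod.fst) := by
          have := stage_eq src dst nbrs (Sn + Sn) Sn Sn (δ :: Δ') []
            ([(src, src)] ++ (δ :: Δ')) (le_refl _) h3 hPOk
            (by simp at hlen hN ⊢; omega)
            (by simp; omega)
          simpa using this
        rw [h5, hbl]
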